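-- pv_equiv track=rewrite | github.com/BombingArt/goit-algo-hw-05 | task_3/task_3.py | count_logs_by_level
-- ===== SOURCE A (Python) =====
-- def count_logs_by_level(logs: list) -> dict:
--     level_counts = {'INFO': 0, 'DEBUG': 0, 'WARNING': 0, 'ERROR': 0}
--     for log in logs:
--         level = log['log_level']
--         if level in level_counts:
--             level_counts[level] += 1
--     sorted_counts = dict(sorted(level_counts.items(), key = lambda item: item[1], reverse = True))
--     return sorted_counts
-- ===== SOURCE B (Python) =====
-- # B: per-level repeated scanning (one comprehension per known level) instead of a
-- # single accumulating pass over a counts dict; same final sort. Objective: alternative.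
-- def count_logs_by_level(logs: list) -> dict:
--     counts = {level: sum(1 for log in logs if log['log_level'] == level)
--               for level in ('INFO', 'DEBUG', 'WARNING', 'ERROR')}
--     return dict(sorted(counts.items(), key=lambda item: item[1], reverse=True))
-- ===== Notes on version B (the rewrite author's own statement) =====
-- stated objective: alternative
-- what changed: Replaces A's single accumulating pass over a mutable counts dict with four independent per-level counting scans (a dict comprehension over the fixed level tuple), keeping the identical final sort.
import Mathlib
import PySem

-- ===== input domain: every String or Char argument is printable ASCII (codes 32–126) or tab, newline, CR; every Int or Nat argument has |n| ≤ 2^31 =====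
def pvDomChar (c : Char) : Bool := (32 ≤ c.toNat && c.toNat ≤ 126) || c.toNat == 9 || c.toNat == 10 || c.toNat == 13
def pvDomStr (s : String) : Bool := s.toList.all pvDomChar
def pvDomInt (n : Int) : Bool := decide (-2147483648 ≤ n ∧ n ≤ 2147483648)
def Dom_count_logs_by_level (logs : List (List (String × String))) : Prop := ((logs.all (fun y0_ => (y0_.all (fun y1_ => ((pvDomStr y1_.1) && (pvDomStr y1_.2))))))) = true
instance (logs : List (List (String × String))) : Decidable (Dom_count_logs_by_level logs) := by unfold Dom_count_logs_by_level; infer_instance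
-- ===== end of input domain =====

-- B replaces A's single accumulating pass over a mutable counts dict with four independent
-- per-level counting scans; the final sort is identical. (Equal return values proved on Pre_.)

-- ===== PORT A =====
-- literal port of A: a counts dict over the four levels, one accumulating pass, then sorted
-- (log['log_level'] is first-match lookup; its KeyError is excluded by Pre_, .getD "" is unreachable there)
def count_logs_by_level (logs : List (List (String × String))) : List (String × Int) :=
  let level_counts : PySem.Dict String Int :=
    PySem.Dict.mk [("INFO", 0), ("DEBUG", 0), ("WARNING", 0), ("ERROR", 0)]
  let level_counts := logs.foldl (fun d log =>
    let level := (log.lookup "log_level").getD ""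
    if d.contains level then d.modify level 0 (· + 1) else d) level_counts
  PySem.List.sorted level_counts.items (fun item => item.2) true

-- ===== PORT B =====
-- literal port of B: for each fixed level, sum(1 for log in logs if log['log_level'] == level)
def count_logs_by_level_alt (logs : List (List (String × String))) : List (String × Int) :=
  let counts := ["INFO", "DEBUG", "WARNING", "ERROR"].map (fun level =>
    (level, logs.foldl (fun acc log =>
      if ((log.lookup "log_level").getD "") == level then acc + 1 else acc) (0 : Int)))
  PySem.List.sorted counts (fun item => item.2) true

-- ===== PRECONDITION & SPEC =====
-- Pre_ excludes exactly the inputs where Python A raises KeyError: a log dict without a 'log_level' key.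
def Pre_count_logs_by_level (logs : List (List (String × String))) : Prop :=
  ∀ log ∈ logs, "log_level" ∈ log.map Prod.fst
instance (logs : List (List (String × String))) : Decidable (Pre_count_logs_by_level logs) := by
  unfold Pre_count_logs_by_level; infer_instance
def pvWitness_count_logs_by_level : (List (List (String × String))) :=
  [[("log_level", "ERROR"), ("msg", "boom")], [("log_level", "INFO")]]
def Spec_count_logs_by_level (logs : List (List (String × String))) (out : List (String × Int)) : Prop := out = count_logs_by_level_alt logs
instance (logs : List (List (String × String))) (out : List (String × Int)) : Decidable (Spec_count_logs_by_level logs out) := by unfold Spec_count_logs_by_level; infer_instance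

-- ===== CLAIM (what is proved, stated in full; the proofs are below) =====
def Claim_equal_count_logs_by_level : Prop := ∀ (logs : List (List (String × String))), Dom_count_logs_by_level logs → Pre_count_logs_by_level logs → Spec_count_logs_by_level logs (count_logs_by_level logs)

-- ===== LEMMAS AND PROOFS =====

-- the level extracted from one log record, shared by both proofs
def pvLevel (log : List (String × String)) : String := (log.lookup "log_level").getD ""

-- A's loop body
def pvStep (d : PySem.Dict String Int) (log : List (String × String)) : PySem.Dict String Int :=
  let level := pvLevel log
  if d.contains level then d.modify level 0 (· + 1) else d

lemma fold_keys (logs : List (List (String × String))) (d : PySem.Dict String Int) :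
    (logs.foldl pvStep d).keys = d.keys := by
  induction logs generalizing d with
  | nil => rfl
  | cons l t ih =>
    simp only [List.foldl_cons]
    rw [ih]
    by_cases h : d.contains (pvLevel l) = true
    · simp [pvStep, h]
      exact PySem.Dict.keys_insert_of_contains _ _ h
    · simp [pvStep, h]

lemma fold_getD (logs : List (List (String × String))) (d : PySem.Dict String Int)
    (v : String) (hv : d.contains v = true) :
    (logs.foldl pvStep d).getD v 0 = d.getD v 0 + ((logs.map pvLevel).count v : Int) := by
  induction logs generalizing d with
  | nil => simp
  | cons l t ih =>
    simp only [List.foldl_cons, List.map_cons]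
    by_cases h : d.contains (pvLevel l) = true
    · have hstep : pvStep d l = d.modify (pvLevel l) 0 (· + 1) := by
        unfold pvStep; simp [h]
      rw [hstep, ih _ (by rw [PySem.Dict.contains_modify]; simp [hv])]
      rw [PySem.Dict.getD_modify]
      by_cases hv2 : v = pvLevel l
      · subst hv2; simp; omega
      · simp [hv2, Ne.symm hv2]
    · have hstep : pvStep d l = d := by unfold pvStep; simp [h]
      have hne : pvLevel l ≠ v := by rintro rfl; exact h hv
      rw [hstep, ih _ hv]
      simp [hne]

lemma fold_items (logs : List (List (String × String))) :
    (logs.foldl pvStep (PySem.Dict.mk [("INFO", 0), ("DEBUG", 0), ("WARNING", 0), ("ERROR", 0)])).items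
      = [("INFO", ((logs.map pvLevel).count "INFO" : Int)),
         ("DEBUG", ((logs.map pvLevel).count "DEBUG" : Int)),
         ("WARNING", ((logs.map pvLevel).count "WARNING" : Int)),
         ("ERROR", ((logs.map pvLevel).count "ERROR" : Int))] := by
  set d0 : PySem.Dict String Int := PySem.Dict.mk [("INFO", 0), ("DEBUG", 0), ("WARNING", 0), ("ERROR", 0)] with hd0
  have hkeys : (logs.foldl pvStep d0).keys = ["INFO", "DEBUG", "WARNING", "ERROR"] := by
    rw [fold_keys]; decide
  have hnd : (logs.foldl pvStep d0).keys.Nodup := by rw [hkeys]; decide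
  rw [PySem.Dict.items_eq_map_keys _ hnd 0, hkeys]
  have hg : ∀ v : String, d0.contains v = true →
      (logs.foldl pvStep d0).getD v 0 = d0.getD v 0 + ((logs.map pvLevel).count v : Int) :=
    fun v hv => fold_getD logs d0 v hv
  simp only [List.map_cons, List.map_nil]
  rw [hg "INFO" (by decide), hg "DEBUG" (by decide), hg "WARNING" (by decide), hg "ERROR" (by decide)]
  norm_num
  decide

lemma alt_counts (logs : List (List (String × String))) (level : String) :
    logs.foldl (fun acc log =>
      if ((log.lookup "log_level").getD "") == level then acc + 1 else acc) (0 : Int)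
      = ((logs.map pvLevel).count level : Int) := by
  have h : logs.foldl (fun acc log =>
      if ((log.lookup "log_level").getD "") == level then acc + 1 else acc) (0 : Int)
      = (logs.map pvLevel).foldl (fun acc x => if x == level then acc + 1 else acc) (0 : Int) := by
    rw [List.foldl_map]; rfl
  rw [h, PySem.List.foldl_beq_add_one]
  omega

-- ===== VERDICT (by name: the statement is the Claim_ definition above) =====
theorem count_logs_by_level_spec : Claim_equal_count_logs_by_level := by
  intro logs _ _
  unfold Spec_count_logs_by_level count_logs_by_level count_logs_by_level_alt
  have hA : (logs.foldl (fun d log =>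
      let level := (log.lookup "log_level").getD ""
      if d.contains level then d.modify level 0 (· + 1) else d)
      (PySem.Dict.mk [("INFO", 0), ("DEBUG", 0), ("WARNING", 0), ("ERROR", 0)]))
      = logs.foldl pvStep (PySem.Dict.mk [("INFO", 0), ("DEBUG", 0), ("WARNING", 0), ("ERROR", 0)]) := rfl
  simp only [hA, fold_items, List.map_cons, List.map_nil, alt_counts]
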